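-- pv_equiv track=rewrite | github.com/flinksey/Grid-Game | grid_game.py | is_game
-- ===== SOURCE A (Python) =====
-- from collections import Counter
--
-- def is_game(contents):
--     #fxn that checks whether there are any possible plays in the current round
--     #basically, this should just check whether any displayed value has more than 2 occurrences
--     cell_values = [i[0] for i in contents if i[0] != "-"]
--     count = Counter(cell_values)
--     validity = False
--     for value in count.values():
--         if value >= 3:
--             validity = True
--             break
--     return validity
-- ===== SOURCE B (Python) =====
-- def is_game(contents):
--     cell_values = [i[0] for i in contents if i[0] != "-"]
--     cell_values.sort()
--     prev = None
--     run = 0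
--     for v in cell_values:
--         if v == prev:
--             run += 1
--         else:
--             prev = v
--             run = 1
--         if run >= 3:
--             return True
--     return False
-- ===== Notes on version B (the rewrite author's own statement) =====
-- stated objective: alternative
-- what changed: Replaces the Counter hash-count pass with a sort followed by a single run-length scan that returns True as soon as three equal values appear consecutively.
import Mathlib
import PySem

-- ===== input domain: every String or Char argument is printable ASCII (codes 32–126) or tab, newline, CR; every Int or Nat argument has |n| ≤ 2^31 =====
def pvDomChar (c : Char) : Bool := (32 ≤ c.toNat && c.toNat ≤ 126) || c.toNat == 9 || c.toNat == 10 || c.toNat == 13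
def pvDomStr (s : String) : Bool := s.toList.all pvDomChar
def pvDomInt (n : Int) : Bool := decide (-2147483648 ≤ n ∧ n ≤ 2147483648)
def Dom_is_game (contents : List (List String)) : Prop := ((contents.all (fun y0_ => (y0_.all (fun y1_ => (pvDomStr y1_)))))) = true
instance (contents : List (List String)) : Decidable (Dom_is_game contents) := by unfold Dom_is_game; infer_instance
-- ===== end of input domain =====

-- B replaces A's Counter tally with sort + a single run-length scan; equivalence of return values,
-- proved on inputs whose rows are all nonempty (elsewhere both Pythons raise IndexError on i[0]).

-- ===== PORT A =====
def is_game (contents : List (List String)) : Bool :=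
  let cell_values :=
    (contents.filterMap (fun i => PySem.List.pyGet? i 0)).filter (fun v => v ≠ "-")
  let count := PySem.Dict.counter cell_values
  -- for value in count.values(): if value >= 3: validity = True; break
  count.values.foldl (fun validity value =>
    if validity then validity else if value ≥ 3 then true else validity) false

-- ===== PORT B =====
-- run-length scan over the sorted list: (prev, run) state, stops at a run of 3
def pvScan : Option String → Int → List String → Bool
  | _, _, [] => false
  | prev, run, v :: rest =>
    let run' := if some v == prev then run + 1 else 1
    if run' ≥ 3 then true else pvScan (some v) run' rest

def is_game_alt (contents : List (List String)) : Bool :=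
  let cell_values :=
    (contents.filterMap (fun i => PySem.List.pyGet? i 0)).filter (fun v => v ≠ "-")
  pvScan none 0 (PySem.List.sorted cell_values (fun x => x) false)

-- ===== PRECONDITION & SPEC =====
-- Pre_ excludes contents containing an empty row, on which A's i[0] raises IndexError (B raises there too).
def Pre_is_game (contents : List (List String)) : Prop := ∀ i ∈ contents, i ≠ []
instance (contents : List (List String)) : Decidable (Pre_is_game contents) := by unfold Pre_is_game; infer_instance
def pvWitness_is_game : List (List String) := [["a"], ["a"], ["-"], ["a", "x"]]

def Spec_is_game (contents : List (List String)) (out : Bool) : Prop := out = is_game_alt contents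
instance (contents : List (List String)) (out : Bool) : Decidable (Spec_is_game contents out) := by unfold Spec_is_game; infer_instance

-- ===== CLAIM (what is proved, stated in full; the proofs are below) =====
def Claim_equal_is_game : Prop := ∀ (contents : List (List String)), Dom_is_game contents → Pre_is_game contents → Spec_is_game contents (is_game contents)

-- ===== LEMMAS AND PROOFS =====

-- A's break-loop fold over the counter's values is Bool-any of (· ≥ 3)
theorem pvFoldl_any (l : List Int) (b : Bool) :
    l.foldl (fun validity value =>
      if validity then validity else if value ≥ 3 then true else validity) b
      = (b || l.any (fun v => v ≥ 3)) := by
  induction l generalizing b with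
  | nil => simp
  | cons x t ih =>
    simp only [List.foldl_cons, List.any_cons, ih]
    by_cases hb : b <;> by_cases hx : x ≥ 3 <;> simp [hb, hx]

-- A returns true iff some value occurs ≥ 3 times in cell_values
theorem pvA_iff (xs : List String) :
    ((PySem.Dict.counter xs).values.foldl (fun validity value =>
      if validity then validity else if value ≥ 3 then true else validity) false) = true
      ↔ ∃ v ∈ xs, 3 ≤ xs.count v := by
  rw [pvFoldl_any]
  have hv : (PySem.Dict.counter xs).values
      = (PySem.Set.ofList xs).map (fun k => (xs.count k : Int)) := by
    have := PySem.Dict.items_counter (xs := xs)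
    simp only [PySem.Dict.values, this, List.map_map]
    rfl
  simp only [Bool.false_or, hv, List.any_map, List.any_eq_true, Function.comp]
  constructor
  · rintro ⟨v, hm, hc⟩
    exact ⟨v, (PySem.Set.mem_ofList xs v).1 hm, by simpa using of_decide_eq_true hc⟩
  · rintro ⟨v, hm, hc⟩
    exact ⟨v, (PySem.Set.mem_ofList xs v).2 hm, by simpa using hc⟩

theorem pvCount_zero_of_not_mem {v : String} {l : List String} (h : v ∉ l) : l.count v = 0 :=
  List.count_eq_zero.2 h

-- scan invariant on a sorted tail: all of l is ≥ p, the current run of p has length `run`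
theorem pvScan_sorted (l : List String) (p : String) (run : Int)
    (hrun : run < 3) (hs : l.Pairwise (· ≤ ·)) (hp : ∀ x ∈ l, p ≤ x) :
    (pvScan (some p) run l = true
      ↔ (3 ≤ run + l.count p ∨ ∃ v ∈ l, v ≠ p ∧ 3 ≤ l.count v)) := by
  induction l generalizing p run with
  | nil => simp [pvScan]; omega
  | cons x t ih =>
    have hs' : t.Pairwise (· ≤ ·) := hs.of_cons
    have hxle : ∀ y ∈ t, x ≤ y := fun y hy => List.rel_of_pairwise_cons hs hy
    by_cases hxp : x = p
    · subst hxp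
      have hcond : (if ((some x == some x) = true) then run + 1 else 1) = run + 1 := by simp
      simp only [pvScan] at *
      rw [hcond]
      by_cases h3 : run + 1 ≥ 3
      · simp only [if_pos h3, List.count_cons_self]
        constructor
        · intro _
          left
          have : (0 : Int) ≤ (t.count x : Int) := by positivity
          omega
        · intro _; trivial
      · rw [if_neg h3]
        rw [ih x (run + 1) (by omega) hs' hxle]
        simp only [List.count_cons_self]
        constructor
        · rintro (h | ⟨v, hv, hvp, hc⟩)
          · left; omega
          · right
            refine ⟨v, List.mem_cons_of_mem _ hv, hvp, ?_⟩
            rwa [List.count_cons_of_ne (Ne.symm hvp)]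
        · rintro (h | ⟨v, hv, hvp, hc⟩)
          · left; omega
          · right
            rcases List.mem_cons.1 hv with h1 | h1
            · exact absurd h1 hvp
            · exact ⟨v, h1, hvp, by rwa [List.count_cons_of_ne (Ne.symm hvp)] at hc⟩
    · have hpx : p < x := lt_of_le_of_ne (hp x (List.mem_cons_self)) (fun h => hxp h.symm)
      have hpt : p ∉ (x :: t) := by
        intro hm
        rcases List.mem_cons.1 hm with h1 | h1
        · exact hxp h1.symm
        · exact absurd (hxle p h1) (not_le.2 hpx)
      simp only [pvScan]
      rw [show (some x == some p) = false by simpa using hxp]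
      simp only [Bool.false_eq_true, if_false]
      rw [if_neg (by omega : ¬ (1 : Int) ≥ 3)]
      rw [ih x 1 (by omega) hs' hxle]
      have hcp : (x :: t).count p = 0 := pvCount_zero_of_not_mem hpt
      constructor
      · rintro (h | ⟨v, hv, hvx, hc⟩)
        · right
          refine ⟨x, List.mem_cons_self, fun h' => hxp h', ?_⟩
          rw [List.count_cons_self]
          omega
        · right
          have hvp : v ≠ p := by
            intro h'; subst h'
            exact absurd (hxle v hv) (not_le.2 hpx)
          refine ⟨v, List.mem_cons_of_mem _ hv, hvp, ?_⟩
          rwa [List.count_cons_of_ne (Ne.symm hvx)]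
      · rintro (h | ⟨v, hv, hvp, hc⟩)
        · rw [hcp] at h; omega
        · rcases List.mem_cons.1 hv with h1 | h1
          · subst h1
            left
            rw [List.count_cons_self] at hc
            omega
          · by_cases hvx : v = x
            · subst hvx
              left
              rw [List.count_cons_self] at hc
              omega
            · right
              exact ⟨v, h1, hvx, by rwa [List.count_cons_of_ne (Ne.symm hvx)] at hc⟩

-- B returns true iff some value occurs ≥ 3 times in cell_values
theorem pvB_iff (xs : List String) :
    pvScan none 0 (PySem.List.sorted xs (fun x => x) false) = true
      ↔ ∃ v ∈ xs, 3 ≤ xs.count v := by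
  have hperm : (PySem.List.sorted xs (fun x => x) false).Perm xs := PySem.List.sorted_perm xs (fun x => x) false
  have hiff : ∀ v, (3 ≤ (PySem.List.sorted xs (fun x => x) false).count v ↔ 3 ≤ xs.count v) := by
    intro v; rw [hperm.count_eq]
  rcases hsort : PySem.List.sorted xs (fun x => x) false with _ | ⟨x, t⟩
  · have hx : xs = [] := by
      have := hperm; rw [hsort] at this
      exact this.symm.eq_nil
    simp [hx, pvScan]
  · have hpw : (x :: t).Pairwise (· ≤ ·) := by
      have := PySem.List.sorted_pairwise (xs := xs) (key := fun x => x)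
      rw [hsort] at this
      simpa using this
    simp only [pvScan]
    rw [show (some x == (none : Option String)) = false by rfl]
    simp only [Bool.false_eq_true, if_false]
    rw [if_neg (by omega : ¬ (1 : Int) ≥ 3)]
    rw [pvScan_sorted t x 1 (by omega) hpw.of_cons
      (fun y hy => List.rel_of_pairwise_cons hpw hy)]
    have hperm' : (x :: t).Perm xs := by rw [← hsort]; exact hperm
    constructor
    · rintro (h | ⟨v, hv, hvx, hc⟩)
      · refine ⟨x, hperm'.mem_iff.1 List.mem_cons_self, ?_⟩
        rw [← hperm'.count_eq, List.count_cons_self]; omega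
      · refine ⟨v, hperm'.mem_iff.1 (List.mem_cons_of_mem _ hv), ?_⟩
        rw [← hperm'.count_eq, List.count_cons_of_ne (Ne.symm hvx)]; exact hc
    · rintro ⟨v, hv, hc⟩
      have hv' : v ∈ x :: t := hperm'.mem_iff.2 hv
      rw [← hperm'.count_eq] at hc
      by_cases hvx : v = x
      · subst hvx
        left
        rw [List.count_cons_self] at hc
        omega
      · right
        rcases List.mem_cons.1 hv' with h1 | h1
        · exact absurd h1 hvx
        · exact ⟨v, h1, hvx, by rwa [List.count_cons_of_ne (Ne.symm hvx)] at hc⟩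

-- ===== VERDICT (by name: the statement is the Claim_ definition above) =====
theorem is_game_spec : Claim_equal_is_game := by
  intro contents _ _
  unfold Spec_is_game is_game is_game_alt
  set xs := (contents.filterMap (fun i => PySem.List.pyGet? i 0)).filter (fun v => v ≠ "-") with hxs
  have ha := pvA_iff xs
  have hb := pvB_iff xs
  by_cases h : ∃ v ∈ xs, 3 ≤ xs.count v
  · simp only [ha.2 h, hb.2 h]
  · have h1 : ¬ _ = true := fun hh => h (ha.1 hh)
    have h2 : ¬ _ = true := fun hh => h (hb.1 hh)
    simp only [Bool.not_eq_true] at h1 h2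
    rw [h1, h2]
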